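-- pv_equiv track=rewrite | github.com/EdouardPradie/Cryptographie | src/utils/Aes_cipher/Aes.py | big_indian
-- ===== SOURCE A (Python) =====
-- def big_indian(string : str):
--     i : int = 0
--     result : str = ""
--
--     string = string.replace("0x", "")
--     if (len(string) % 2 == 1):
--         string = "0" + string
--     while (i < len(string)):
--         result += string[i + 1]
--         result += string[i]
--         i += 2
--     return result
-- ===== SOURCE B (Python) =====
-- def big_indian(string: str):
--     string = string.replace("0x", "")
--     if len(string) % 2 == 1:
--         string = "0" + string
--     # View the task as applying the index permutation i -> i-1 (odd i) / i+1 (even i):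
--     # output character k is input character at the partner index, gathered in one map.
--     return "".join(string[i - 1 if i % 2 else i + 1] for i in range(len(string)))
-- ===== Notes on version B (the rewrite author's own statement) =====
-- stated objective: faster
-- what changed: Replaced the index-stepping while loop that emits swapped pairs by repeated string concatenation with a gather by the index permutation i -> i-1/i+1: one map over all positions reading the partner character, joined once.
import Mathlib
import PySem

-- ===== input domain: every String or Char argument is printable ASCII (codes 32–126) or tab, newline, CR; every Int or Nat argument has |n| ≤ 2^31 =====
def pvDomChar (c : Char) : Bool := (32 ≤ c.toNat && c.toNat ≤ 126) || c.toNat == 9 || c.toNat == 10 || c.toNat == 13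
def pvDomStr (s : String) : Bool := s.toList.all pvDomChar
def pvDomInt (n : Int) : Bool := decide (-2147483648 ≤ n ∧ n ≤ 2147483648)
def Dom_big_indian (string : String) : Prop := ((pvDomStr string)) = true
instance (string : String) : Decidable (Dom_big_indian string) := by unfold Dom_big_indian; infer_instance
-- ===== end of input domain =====

-- B replaces A's pair-emitting while loop with repeated concatenation by a single gather over
-- all positions through the index permutation i -> i-1 / i+1, joined once.

-- ===== PORT A =====
-- A's while loop: reads string[i+1] and string[i], steps i by 2, appends to result.
-- After the odd-length pad the string length is even, so both indexes are in range on every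
-- iteration; getD hence returns exactly what Python's string[...] returns (the default is never used).
def bigLoopA (s : List Char) (i : Nat) (result : List Char) : List Char :=
  if i < s.length then
    bigLoopA s (i + 2) (result ++ [s.getD (i + 1) ' ', s.getD i ' '])
  else result
termination_by s.length - i
decreasing_by omega

def big_indian (string : String) : String :=
  let t := PySem.Str.replace string "0x" ""
  let t := if t.toList.length % 2 == 1 then String.ofList ('0' :: t.toList) else t
  String.ofList (bigLoopA t.toList 0 [])

-- ===== PORT B =====
-- B's comprehension: for each i in range(len(string)) read string[i-1 if i%2 else i+1].
-- After the pad the length is even, so the partner index is always in range; getD hence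
-- returns exactly what Python's string[...] returns (the default is never used).
def big_indian_alt (string : String) : String :=
  let t := PySem.Str.replace string "0x" ""
  let t := if t.toList.length % 2 == 1 then String.ofList ('0' :: t.toList) else t
  let l := t.toList
  String.ofList ((List.range l.length).map (fun i => l.getD (if i % 2 == 1 then i - 1 else i + 1) ' '))

-- ===== PRECONDITION & SPEC =====
def Spec_big_indian (string : String) (out : String) : Prop := out = big_indian_alt string
instance (string : String) (out : String) : Decidable (Spec_big_indian string out) := by unfold Spec_big_indian; infer_instance

-- ===== CLAIM (what is proved, stated in full; the proofs are below) =====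
def Claim_equal_big_indian : Prop := ∀ (string : String), Dom_big_indian string → Spec_big_indian string (big_indian string)

-- ===== LEMMAS AND PROOFS =====

-- proof-side pairwise view of the swapped string, used as a bridge between the two ports
def pySelfZip : List Char → List (Char × Char)
  | a :: b :: rest => (a, b) :: pySelfZip rest
  | _ => []

def swB (l : List Char) : List Char := ((pySelfZip l).map (fun p => [p.2, p.1])).flatten

lemma swB_cons_cons (a b : Char) (r : List Char) : swB (a :: b :: r) = b :: a :: swB r := by
  simp [swB, pySelfZip]

lemma bigLoopA_eq (s : List Char) (hs : s.length % 2 = 0) :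
    ∀ (n i : Nat), s.length - i ≤ n → i % 2 = 0 → ∀ (acc : List Char),
      bigLoopA s i acc = acc ++ swB (s.drop i) := by
  intro n
  induction n with
  | zero =>
    intro i hni _ acc
    rw [bigLoopA]
    have h : ¬ i < s.length := by omega
    simp [h, List.drop_eq_nil_of_le (by omega : s.length ≤ i), swB, pySelfZip]
  | succ n ih =>
    intro i hni hi acc
    rw [bigLoopA]
    by_cases h : i < s.length
    · have h1 : i + 1 < s.length := by omega
      have hd : s.drop i = s[i] :: s.drop (i + 1) := List.drop_eq_getElem_cons h
      have hd2 : s.drop (i + 1) = s[i + 1] :: s.drop (i + 2) := List.drop_eq_getElem_cons h1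
      simp only [h, if_true]
      rw [ih (i + 2) (by omega) (by omega), hd, hd2, swB_cons_cons,
          List.getD_eq_getElem s ' ' h, List.getD_eq_getElem s ' ' h1]
      simp
    · simp [h, List.drop_eq_nil_of_le (by omega : s.length ≤ i), swB, pySelfZip]

-- characterization of swB as the gather by the partner-index permutation
lemma swB_getD : ∀ (n : Nat) (l : List Char), l.length ≤ n → l.length % 2 = 0 →
    (swB l).length = l.length ∧
      ∀ j, j < l.length → (swB l).getD j ' ' = l.getD (if j % 2 == 1 then j - 1 else j + 1) ' ' := by
  intro n
  induction n with
  | zero =>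
    intro l hn _
    have : l = [] := by cases l <;> simp_all
    subst this
    simp [swB, pySelfZip]
  | succ n ih =>
    intro l hn hl
    match l with
    | [] => simp [swB, pySelfZip]
    | [a] => simp at hl
    | a :: b :: r =>
      simp only [List.length_cons] at hn hl
      obtain ⟨hlen, hget⟩ := ih r (by omega) (by omega)
      rw [swB_cons_cons]
      constructor
      · simp [hlen]
      · intro j hj
        match j with
        | 0 => simp
        | 1 => simp
        | (j + 2) =>
          simp only [List.length_cons] at hj
          have hj' : j < r.length := by omega
          simp only [List.getD_cons_succ]
          rw [hget j hj']
          have hmod : (j + 2) % 2 = j % 2 := by omega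
          by_cases hp : j % 2 = 1
          · have e1 : (j + 2) % 2 == 1 := by simp [hmod, hp]
            have e2 : (j : Nat) % 2 == 1 := by simp [hp]
            simp only [e1, e2, if_true]
            have : j + 2 - 1 = (j - 1) + 2 := by omega
            rw [this]
            simp
          · have e1 : ((j + 2) % 2 == 1) = false := by simp [hmod]; omega
            have e2 : ((j : Nat) % 2 == 1) = false := by simp; omega
            simp only [e1, e2]
            have : j + 2 + 1 = (j + 1) + 2 := by omega
            rw [this]
            simp

lemma swB_eq_gather (l : List Char) (hl : l.length % 2 = 0) :
    swB l = (List.range l.length).map (fun i => l.getD (if i % 2 == 1 then i - 1 else i + 1) ' ') := by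
  obtain ⟨hlen, hget⟩ := swB_getD l.length l le_rfl hl
  apply List.ext_getElem
  · simp [hlen]
  · intro j h1 h2
    have hj : j < l.length := by omega
    have := hget j hj
    rw [List.getD_eq_getElem _ _ h1] at this
    rw [this]
    simp

lemma core_eq (t : String) (ht : t.toList.length % 2 = 0) :
    String.ofList (bigLoopA t.toList 0 []) =
      String.ofList ((List.range t.toList.length).map
        (fun i => t.toList.getD (if i % 2 == 1 then i - 1 else i + 1) ' ')) := by
  rw [bigLoopA_eq t.toList ht t.toList.length 0 (by omega) (by omega), List.drop_zero,
      List.nil_append, swB_eq_gather _ ht]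

-- ===== VERDICT =====
theorem big_indian_spec : Claim_equal_big_indian := by
  intro string _
  unfold Spec_big_indian big_indian big_indian_alt
  dsimp only
  split_ifs with h
  · simp only [beq_iff_eq] at h
    exact core_eq _ (by simp only [String.toList_ofList, List.length_cons]; omega)
  · simp only [beq_iff_eq] at h
    exact core_eq _ (by omega)
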